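-- pv_equiv track=rewrite | github.com/shmahdiye/advanced_programming-project | jojo.py | count_numbers_with_smallest_factor
-- ===== SOURCE A (Python) =====
-- def is_prime(number):
--     if number <= 1:
--         return False
--     else:
--         for i in range(2, number):
--             if number % i == 0:
--                 return False
--         else:
--             return True
--
-- def smallest_factor(number):
--     if number <= 1:
--         return 1
--     for i in range(2, number):
--         if number % i == 0:
--             return i
--
-- def count_numbers_with_smallest_factor(n, m):
--     if is_prime(m):
--         return -1
--     count = 0
--     for r in range(m):
--         if not is_prime(r) and smallest_factor(r) <= smallest_factor(m):
--             count += 1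
--     for r in range(m + 1, n + 1):
--         if not is_prime(r) and smallest_factor(r) < smallest_factor(m):
--             count += 1
--     return count
-- ===== SOURCE B (Python) =====
-- def count_numbers_with_smallest_factor(n, m):
--     # sf(x) = 1 for x <= 1, else smallest prime factor of x (x itself if prime),
--     # found by trial division up to sqrt(x) instead of A's full O(x) scans.
--     def spf(x):
--         if x <= 1:
--             return 1
--         i = 2
--         while i * i <= x:
--             if x % i == 0:
--                 return i
--             i += 1
--         return x  # x is prime
--
--     sm = spf(m)
--     if m >= 2 and sm == m:  # m is prime
--         return -1
--     count = 0
--     for r in range(m):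
--         f = spf(r)
--         if (r < 2 or f < r) and f <= sm:
--             count += 1
--     for r in range(m + 1, n + 1):
--         f = spf(r)
--         if (r < 2 or f < r) and f < sm:
--             count += 1
--     return count
-- ===== Notes on version B (the rewrite author's own statement) =====
-- stated objective: faster
-- what changed: A calls two separate full trial scans per number (is_prime up to x and smallest_factor up to x); B computes each number's smallest prime factor once by trial division that stops at sqrt(x) and derives both the primality test and the factor comparison from it.
import Mathlib
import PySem

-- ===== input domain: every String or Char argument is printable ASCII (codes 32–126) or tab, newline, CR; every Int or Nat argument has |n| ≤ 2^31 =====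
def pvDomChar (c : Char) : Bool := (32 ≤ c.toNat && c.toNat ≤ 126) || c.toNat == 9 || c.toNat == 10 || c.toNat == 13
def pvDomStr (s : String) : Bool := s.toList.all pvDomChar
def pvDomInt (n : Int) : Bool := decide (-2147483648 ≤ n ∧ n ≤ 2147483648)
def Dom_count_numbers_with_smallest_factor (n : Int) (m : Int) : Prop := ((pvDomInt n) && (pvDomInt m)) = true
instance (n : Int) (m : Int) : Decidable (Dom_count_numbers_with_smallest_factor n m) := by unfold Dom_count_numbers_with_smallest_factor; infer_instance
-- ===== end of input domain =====

-- B replaces A's per-number O(x) trial scans (is_prime + smallest_factor, each to x) by a single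
-- smallest-prime-factor trial division stopping at sqrt(x); same return value, measured faster.

-- ===== PORT A =====
-- the `for i in range(2, number)` loop of is_prime (early return False on a divisor)
def pvIsPrimeLoop (number : Int) : List Int → Bool
  | [] => true
  | i :: rest => if PySem.Int.mod number i == 0 then false else pvIsPrimeLoop number rest

def is_prime (number : Int) : Bool :=
  if number ≤ 1 then false else pvIsPrimeLoop number (PySem.List.pyRange 2 number 1)

-- the `for i in range(2, number)` loop of smallest_factor; falling off returns Python's None
def pvSfLoop (number : Int) : List Int → Option Int
  | [] => none
  | i :: rest => if PySem.Int.mod number i == 0 then some i else pvSfLoop number rest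

def smallest_factor (number : Int) : Option Int :=
  if number ≤ 1 then some 1 else pvSfLoop number (PySem.List.pyRange 2 number 1)

-- Python's `<=` / `<` on the results; `none` (None) would raise TypeError, but A compares only
-- after `not is_prime(r)` and the non-prime-m branch, where smallest_factor returns an int,
-- so the `none` cases are unreachable; they are mapped to false.
def pvOptLe : Option Int → Option Int → Bool
  | some a, some b => decide (a ≤ b)
  | _, _ => false

def pvOptLt : Option Int → Option Int → Bool
  | some a, some b => decide (a < b)
  | _, _ => false

def count_numbers_with_smallest_factor (n : Int) (m : Int) : Int :=
  if is_prime m then -1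
  else
    let c1 := (PySem.List.pyRange 0 m 1).foldl
      (fun c r => if !is_prime r && pvOptLe (smallest_factor r) (smallest_factor m)
                  then c + 1 else c) 0
    (PySem.List.pyRange (m + 1) (n + 1) 1).foldl
      (fun c r => if !is_prime r && pvOptLt (smallest_factor r) (smallest_factor m)
                  then c + 1 else c) c1

-- ===== PORT B =====
-- Source B's `while i * i <= x` trial-division loop
def pvSpfLoop (x i : Int) : Int :=
  if h : i * i ≤ x then
    (if PySem.Int.mod x i == 0 then i else pvSpfLoop x (i + 1))
  else x
termination_by (x + 1 - i).toNat
decreasing_by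
  have hix : i ≤ x := by
    by_cases h0 : i ≤ 0
    · nlinarith
    · nlinarith
  omega

-- Source B's spf helper: 1 for x ≤ 1, else smallest prime factor (x itself when x is prime)
def pvSpf (x : Int) : Int := if x ≤ 1 then 1 else pvSpfLoop x 2

def count_numbers_with_smallest_factor_alt (n : Int) (m : Int) : Int :=
  let sm := pvSpf m
  if decide (2 ≤ m) && (sm == m) then -1
  else
    let c1 := (PySem.List.pyRange 0 m 1).foldl
      (fun c r =>
        let f := pvSpf r
        if (decide (r < 2) || decide (f < r)) && decide (f ≤ sm) then c + 1 else c) 0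
    (PySem.List.pyRange (m + 1) (n + 1) 1).foldl
      (fun c r =>
        let f := pvSpf r
        if (decide (r < 2) || decide (f < r)) && decide (f < sm) then c + 1 else c) c1

-- ===== PRECONDITION & SPEC =====
def Spec_count_numbers_with_smallest_factor (n : Int) (m : Int) (out : Int) : Prop := out = count_numbers_with_smallest_factor_alt n m
instance (n : Int) (m : Int) (out : Int) : Decidable (Spec_count_numbers_with_smallest_factor n m out) := by unfold Spec_count_numbers_with_smallest_factor; infer_instance

-- ===== CLAIM (what is proved, stated in full; the proofs are below) =====
def Claim_equal_count_numbers_with_smallest_factor : Prop := ∀ (n : Int) (m : Int), Dom_count_numbers_with_smallest_factor n m → Spec_count_numbers_with_smallest_factor n m (count_numbers_with_smallest_factor n m)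

-- ===== LEMMAS AND PROOFS =====

-- is_prime's loop succeeds exactly when smallest_factor's loop finds nothing
lemma pvIsPrimeLoop_eq_isNone (x : Int) (l : List Int) :
    pvIsPrimeLoop x l = (pvSfLoop x l).isNone := by
  induction l with
  | nil => rfl
  | cons a t ih =>
    simp only [pvIsPrimeLoop, pvSfLoop]
    split_ifs with h <;> simp [ih]

lemma pvSfLoop_none (x : Int) (l : List Int) (h : ∀ j ∈ l, PySem.Int.mod x j ≠ 0) :
    pvSfLoop x l = none := by
  induction l with
  | nil => rfl
  | cons a t ih =>
    simp only [pvSfLoop]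
    rw [if_neg (by simpa using h a (by simp))]
    exact ih (fun j hj => h j (by simp [hj]))

lemma pvSfLoop_some_mem (x : Int) (l : List Int) (d : Int) (h : pvSfLoop x l = some d) :
    d ∈ l := by
  induction l with
  | nil => simp [pvSfLoop] at h
  | cons a t ih =>
    simp only [pvSfLoop] at h
    split_ifs at h with h0
    · simp at h; simp [h]
    · simp [ih h]

-- if no divisor lies in [2, i) and i*i > x, there is no divisor in [i, x) either
-- (a divisor j there would have the codivisor x/j in [2, i))
lemma pvNoDiv (x i : Int) (_hx : 2 ≤ x) (hi : 2 ≤ i) (hii : x < i * i)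
    (hnd : ∀ j, 2 ≤ j → j < i → PySem.Int.mod x j ≠ 0) :
    ∀ j, i ≤ j → j < x → PySem.Int.mod x j ≠ 0 := by
  intro j hij hjx hmod
  rw [PySem.Int.mod_eq_zero_iff_dvd] at hmod
  obtain ⟨k, hk⟩ := hmod
  have hj2 : 2 ≤ j := le_trans hi hij
  have hk2 : 2 ≤ k := by
    by_cases h0 : k ≤ 0
    · nlinarith
    · by_cases h1 : k = 1
      · rw [h1, mul_one] at hk; omega
      · omega
  have hki : k < i := by nlinarith
  exact hnd k hk2 hki (by rw [PySem.Int.mod_eq_zero_iff_dvd]; exact ⟨j, by linarith [hk]⟩)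

-- A's upward scan from i agrees with B's sqrt-bounded scan from i, given no divisor below i
lemma pvLoopEq (x : Int) (hx : 2 ≤ x) :
    ∀ (fuel : Nat) (i : Int), (x + 1 - i).toNat ≤ fuel → 2 ≤ i →
    (∀ j, 2 ≤ j → j < i → PySem.Int.mod x j ≠ 0) →
    pvSfLoop x (PySem.List.pyRange i x 1) =
      (if pvSpfLoop x i = x then none else some (pvSpfLoop x i)) := by
  intro fuel
  induction fuel with
  | zero =>
    intro i hf hi hnd
    -- fuel 0 forces x < i, so i*i > x and the range is empty
    have hxi : x < i := by omega
    have hii : x < i * i := by nlinarith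
    rw [pvSpfLoop, dif_neg (not_le.mpr hii), if_pos rfl]
    exact pvSfLoop_none x _ (by intro j hj; rw [PySem.List.mem_pyRange_one] at hj; omega)
  | succ fuel ih =>
    intro i hf hi hnd
    by_cases h1 : i * i ≤ x
    · have hix : i < x := by nlinarith
      rw [PySem.List.pyRange_one_cons hix]
      by_cases h2 : PySem.Int.mod x i = 0
      · have hs : pvSpfLoop x i = i := by
          rw [pvSpfLoop, dif_pos h1, if_pos (by simpa using h2)]
        rw [hs, if_neg (by omega)]
        simp [pvSfLoop, h2]
      · have hs : pvSpfLoop x i = pvSpfLoop x (i + 1) := by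
          rw [pvSpfLoop, dif_pos h1, if_neg (by simpa using h2)]
        have hstep : pvSfLoop x (i :: PySem.List.pyRange (i + 1) x 1) =
            pvSfLoop x (PySem.List.pyRange (i + 1) x 1) := by
          simp [pvSfLoop, h2]
        rw [hs, hstep]
        exact ih (i + 1) (by omega) (by omega)
          (fun j hj2 hji => by
            by_cases h : j < i
            · exact hnd j hj2 h
            · have : j = i := by omega
              subst this; exact h2)
    · rw [pvSpfLoop, dif_neg h1, if_pos rfl]
      exact pvSfLoop_none x _ (by
        intro j hj
        rw [PySem.List.mem_pyRange_one] at hj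
        exact pvNoDiv x i hx hi (by omega) hnd j hj.1 hj.2)

lemma pvSfLoop_spf (x : Int) (hx : 2 ≤ x) :
    pvSfLoop x (PySem.List.pyRange 2 x 1) =
      (if pvSpf x = x then none else some (pvSpf x)) := by
  have := pvLoopEq x hx (x + 1 - 2).toNat 2 le_rfl le_rfl (by intro j h2 hj; omega)
  simpa [pvSpf, show ¬ x ≤ 1 by omega] using this

lemma pvSf_char (x : Int) (hx : 2 ≤ x) :
    smallest_factor x = (if pvSpf x = x then none else some (pvSpf x)) := by
  rw [smallest_factor, if_neg (by omega)]
  exact pvSfLoop_spf x hx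

lemma pvPrime_char (x : Int) (hx : 2 ≤ x) : is_prime x = decide (pvSpf x = x) := by
  rw [is_prime, if_neg (by omega), pvIsPrimeLoop_eq_isNone, pvSfLoop_spf x hx]
  by_cases h : pvSpf x = x <;> simp [h]

lemma pvSpf_bounds (x : Int) (hx : 2 ≤ x) (hne : pvSpf x ≠ x) :
    2 ≤ pvSpf x ∧ pvSpf x < x := by
  have h := pvSfLoop_spf x hx
  rw [if_neg hne] at h
  have := pvSfLoop_some_mem x _ _ h
  rw [PySem.List.mem_pyRange_one] at this
  exact this

lemma pvSfm_some (m : Int) (hm : ¬ (2 ≤ m ∧ pvSpf m = m)) :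
    smallest_factor m = some (pvSpf m) := by
  by_cases h : m ≤ 1
  · simp [smallest_factor, pvSpf, h]
  · have hx : 2 ≤ m := by omega
    rw [pvSf_char m hx, if_neg (fun he => hm ⟨hx, he⟩)]

lemma pvSpf_le_one (x : Int) (h : x ≤ 1) : pvSpf x = 1 := by simp [pvSpf, h]

lemma pvBodyLe (m : Int) (hm : ¬ (2 ≤ m ∧ pvSpf m = m)) (r : Int) :
    (!is_prime r && pvOptLe (smallest_factor r) (smallest_factor m)) =
    ((decide (r < 2) || decide (pvSpf r < r)) && decide (pvSpf r ≤ pvSpf m)) := by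
  rw [pvSfm_some m hm]
  by_cases h : r ≤ 1
  · rw [is_prime, if_pos h, smallest_factor, if_pos h, pvSpf_le_one r h]
    simp [pvOptLe, show r < 2 by omega]
  · have hr : 2 ≤ r := by omega
    rw [pvPrime_char r hr, pvSf_char r hr]
    by_cases he : pvSpf r = r
    · simp [he, pvOptLe, show ¬ r < 2 by omega]
    · have hb := pvSpf_bounds r hr he
      simp [he, pvOptLe, show ¬ r < 2 by omega, hb.2]

lemma pvBodyLt (m : Int) (hm : ¬ (2 ≤ m ∧ pvSpf m = m)) (r : Int) :
    (!is_prime r && pvOptLt (smallest_factor r) (smallest_factor m)) =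
    ((decide (r < 2) || decide (pvSpf r < r)) && decide (pvSpf r < pvSpf m)) := by
  rw [pvSfm_some m hm]
  by_cases h : r ≤ 1
  · rw [is_prime, if_pos h, smallest_factor, if_pos h, pvSpf_le_one r h]
    simp [pvOptLt, show r < 2 by omega]
  · have hr : 2 ≤ r := by omega
    rw [pvPrime_char r hr, pvSf_char r hr]
    by_cases he : pvSpf r = r
    · simp [he, pvOptLt, show ¬ r < 2 by omega]
    · have hb := pvSpf_bounds r hr he
      simp [he, pvOptLt, show ¬ r < 2 by omega, hb.2]

lemma pvBranch (m : Int) : is_prime m = (decide (2 ≤ m) && (pvSpf m == m)) := by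
  by_cases h : m ≤ 1
  · rw [is_prime, if_pos h]
    simp [show ¬ 2 ≤ m by omega]
  · have hx : 2 ≤ m := by omega
    rw [pvPrime_char m hx]
    simp only [hx, decide_true, Bool.true_and]
    by_cases h2 : pvSpf m = m <;> simp [h2]

-- ===== VERDICT (by name: the statement is the Claim_ definition above) =====
theorem count_numbers_with_smallest_factor_spec : Claim_equal_count_numbers_with_smallest_factor := by
  intro n m _
  unfold Spec_count_numbers_with_smallest_factor
  unfold count_numbers_with_smallest_factor count_numbers_with_smallest_factor_alt
  rw [pvBranch m]
  by_cases hb : (decide (2 ≤ m) && (pvSpf m == m)) = true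
  · simp only [hb, if_true]
  · simp only [hb, Bool.false_eq_true, if_false]
    have hm : ¬ (2 ≤ m ∧ pvSpf m = m) := by
      intro ⟨h1, h2⟩; apply hb; simp [h1, h2]
    have hLe : (fun (c r : Int) =>
          if !is_prime r && pvOptLe (smallest_factor r) (smallest_factor m) then c + 1 else c)
        = (fun (c r : Int) =>
          let f := pvSpf r
          if (decide (r < 2) || decide (f < r)) && decide (f ≤ pvSpf m) then c + 1 else c) := by
      funext c r
      simp only [pvBodyLe m hm r]
    have hLt : (fun (c r : Int) =>
          if !is_prime r && pvOptLt (smallest_factor r) (smallest_factor m) then c + 1 else c)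
        = (fun (c r : Int) =>
          let f := pvSpf r
          if (decide (r < 2) || decide (f < r)) && decide (f < pvSpf m) then c + 1 else c) := by
      funext c r
      simp only [pvBodyLt m hm r]
    rw [hLe, hLt]
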